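-- pv_equiv track=rewrite | github.com/asuramaya/conker | carving_machine/data.py | _space_prefixed_words
-- ===== SOURCE A (Python) =====
-- def _space_prefixed_words(text: str) -> list[str]:
--     words: list[str] = []
--     idx = 0
--     limit = len(text)
--     while idx < limit:
--         start = idx
--         if text[idx] == " ":
--             idx += 1
--             while idx < limit and text[idx] == " ":
--                 idx += 1
--             if idx >= limit:
--                 break
--         while idx < limit and text[idx] != " ":
--             idx += 1
--         word = text[start:idx]
--         if word:
--             words.append(word)
--     return words
-- ===== SOURCE B (Python) =====
-- import re
--
-- def _space_prefixed_words(text: str) -> list[str]: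
--     return re.findall(r' *[^ ]+', text)
-- ===== Notes on version B (the rewrite author's own statement) =====
-- stated objective: idiomatic
-- what changed: Replaced the hand-written index-scanning loop (with nested inner while loops) by a single regex call re.findall(r' *[^ ]+', text), which yields each word token together with its leading run of literal spaces.
import Mathlib
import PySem

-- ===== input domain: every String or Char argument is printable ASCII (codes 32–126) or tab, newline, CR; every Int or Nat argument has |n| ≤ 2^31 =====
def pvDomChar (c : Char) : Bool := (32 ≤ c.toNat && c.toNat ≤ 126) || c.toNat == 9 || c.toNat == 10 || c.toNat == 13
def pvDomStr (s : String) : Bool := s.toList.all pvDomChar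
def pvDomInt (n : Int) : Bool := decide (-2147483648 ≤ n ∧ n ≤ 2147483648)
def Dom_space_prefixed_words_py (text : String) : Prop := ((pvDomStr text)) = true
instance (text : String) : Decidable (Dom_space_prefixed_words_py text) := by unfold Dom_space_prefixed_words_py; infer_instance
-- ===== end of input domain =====

-- B replaces A's hand-written index-scanning loop with one regex call re.findall(r' *[^ ]+', text) (idiomatic; a timing run measured it faster by a constant factor).


-- ===== PORT A =====
-- inner `while idx < limit and text[idx] == " "` loop
def skipSp (cs : List Char) (limit idx : Nat) : Nat :=
  if _h : idx < limit ∧ cs.getD idx ' ' = ' ' then skipSp cs limit (idx + 1) else idx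
termination_by limit - idx
decreasing_by omega

-- inner `while idx < limit and text[idx] != " "` loop
def skipNon (cs : List Char) (limit idx : Nat) : Nat :=
  if _h : idx < limit ∧ ¬ cs.getD idx ' ' = ' ' then skipNon cs limit (idx + 1) else idx
termination_by limit - idx
decreasing_by omega

theorem skipSp_ge (cs : List Char) (limit idx : Nat) : idx ≤ skipSp cs limit idx := by
  fun_induction skipSp cs limit idx with
  | case1 idx h ih => omega
  | case2 idx h => omega

theorem skipNon_ge (cs : List Char) (limit idx : Nat) : idx ≤ skipNon cs limit idx := by
  fun_induction skipNon cs limit idx with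
  | case1 idx h ih => omega
  | case2 idx h => omega

theorem skipNon_gt (cs : List Char) (limit idx : Nat) (h : idx < limit)
    (hc : ¬ cs.getD idx ' ' = ' ') : idx < skipNon cs limit idx := by
  rw [skipNon, dif_pos ⟨h, hc⟩]
  have := skipNon_ge cs limit (idx + 1); omega

-- the outer `while idx < limit` loop of A; `start` is the entry value of idx, and
-- `text[start:idx]` is `(cs.drop start).take (idx - start)` (exact here: 0 ≤ start ≤ idx ≤ limit)
def loopA (cs : List Char) (limit idx : Nat) (words : List String) : List String :=
  if h : idx < limit then
    if hsp : cs.getD idx ' ' = ' ' then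
      if hbrk : skipSp cs limit (idx + 1) ≥ limit then words
      else
        loopA cs limit (skipNon cs limit (skipSp cs limit (idx + 1)))
          (if String.ofList ((cs.drop idx).take (skipNon cs limit (skipSp cs limit (idx + 1)) - idx)) = ""
           then words
           else words ++ [String.ofList ((cs.drop idx).take (skipNon cs limit (skipSp cs limit (idx + 1)) - idx))])
    else
      loopA cs limit (skipNon cs limit idx)
        (if String.ofList ((cs.drop idx).take (skipNon cs limit idx - idx)) = ""
         then words
         else words ++ [String.ofList ((cs.drop idx).take (skipNon cs limit idx - idx))])
  else words
termination_by limit - idx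
decreasing_by
  · have h1 := skipSp_ge cs limit (idx + 1)
    have h2 := skipNon_ge cs limit (skipSp cs limit (idx + 1))
    omega
  · have := skipNon_gt cs limit idx h hsp
    omega

def space_prefixed_words_py (text : String) : List String :=
  loopA text.toList text.toList.length 0 []

-- ===== PORT B =====
-- needed by goB's termination proof
theorem dropWhile_lt_of_takeWhile_ne (q : Char → Bool) (l : List Char)
    (h : l.takeWhile q ≠ []) : (l.dropWhile q).length < l.length := by
  cases l with
  | nil => simp at h
  | cons c t =>
      by_cases hc : q c = true
      · have := List.length_dropWhile_le q t
        simp [List.dropWhile_cons, hc]; omega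
      · simp [List.takeWhile_cons, hc] at h

-- Hand port of re.findall(r' *[^ ]+', text): the leftmost-match scan for this pattern —
-- each match is a maximal run of literal spaces followed by a maximal nonempty run of
-- non-space characters; a trailing space run with no following non-space yields no match.
-- Exact for this pattern (only ' ' separates).
def goB (cs : List Char) : List (List Char) :=
  let sp := cs.takeWhile (· == ' ')
  let rest := cs.dropWhile (· == ' ')
  let w := rest.takeWhile (fun c => !(c == ' '))
  if _h : w = [] then []
  else (sp ++ w) :: goB (rest.dropWhile (fun c => !(c == ' ')))
termination_by cs.length
decreasing_by
  have h1 := List.length_dropWhile_le (fun x => x == ' ') cs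
  have h2 := dropWhile_lt_of_takeWhile_ne (fun c => !(c == ' ')) (cs.dropWhile (· == ' ')) _h
  omega

def space_prefixed_words_py_alt (text : String) : List String :=
  (goB text.toList).map String.ofList

-- ===== PRECONDITION & SPEC =====
def Spec_space_prefixed_words_py (text : String) (out : List String) : Prop := out = space_prefixed_words_py_alt text
instance (text : String) (out : List String) : Decidable (Spec_space_prefixed_words_py text out) := by unfold Spec_space_prefixed_words_py; infer_instance

-- ===== CLAIM (what is proved, stated in full; the proofs are below) =====
def Claim_equal_space_prefixed_words_py : Prop := ∀ (text : String), Dom_space_prefixed_words_py text → Spec_space_prefixed_words_py text (space_prefixed_words_py text)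

-- ===== LEMMAS AND PROOFS =====

theorem skipSp_eq (cs : List Char) (idx : Nat) :
    skipSp cs cs.length idx = idx + ((cs.drop idx).takeWhile (· == ' ')).length := by
  fun_induction skipSp cs cs.length idx with
  | case1 idx h ih =>
      obtain ⟨hlt, hc⟩ := h
      rw [List.drop_eq_getElem_cons hlt]
      have hb : cs[idx] = ' ' := by rwa [List.getD_eq_getElem cs ' ' hlt] at hc
      simp [List.takeWhile_cons, hb, ih]; omega
  | case2 idx h =>
      by_cases hlt : idx < cs.length
      · have hc : ¬ cs.getD idx ' ' = ' ' := by tauto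
        rw [List.drop_eq_getElem_cons hlt]
        have hb : (cs[idx] == ' ') = false := by
          rw [List.getD_eq_getElem cs ' ' hlt] at hc; simpa using hc
        simp [List.takeWhile_cons, hb]
      · rw [List.drop_eq_nil_of_le (by omega)]; simp

theorem skipNon_eq (cs : List Char) (idx : Nat) :
    skipNon cs cs.length idx = idx + ((cs.drop idx).takeWhile (fun c => !(c == ' '))).length := by
  fun_induction skipNon cs cs.length idx with
  | case1 idx h ih =>
      obtain ⟨hlt, hc⟩ := h
      rw [List.drop_eq_getElem_cons hlt]
      have hb : (cs[idx] == ' ') = false := by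
        rw [List.getD_eq_getElem cs ' ' hlt] at hc; simpa using hc
      rw [List.takeWhile_cons]
      simp only [hb]
      simp [ih]; omega
  | case2 idx h =>
      by_cases hlt : idx < cs.length
      · have hc : cs.getD idx ' ' = ' ' := by tauto
        rw [List.drop_eq_getElem_cons hlt]
        have hb : cs[idx] = ' ' := by rwa [List.getD_eq_getElem cs ' ' hlt] at hc
        simp [List.takeWhile_cons, hb]
      · rw [List.drop_eq_nil_of_le (by omega)]; simp

theorem dropWhile_eq_drop_len (p : Char → Bool) (l : List Char) :
    l.dropWhile p = l.drop (l.takeWhile p).length := by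
  induction l with
  | nil => simp
  | cons c t ih =>
      by_cases hc : p c = true
      · simp [List.dropWhile_cons, List.takeWhile_cons, hc, ih]
      · simp [List.dropWhile_cons, List.takeWhile_cons, hc]

theorem takeWhile_eq_take_len (p : Char → Bool) (l : List Char) :
    l.takeWhile p = l.take (l.takeWhile p).length := by
  induction l with
  | nil => simp
  | cons c t ih =>
      by_cases hc : p c = true
      · simpa [List.takeWhile_cons, hc] using ih
      · simp [List.takeWhile_cons, hc]

theorem skipSp_stop (cs : List Char) (limit idx : Nat) (h : skipSp cs limit idx < limit) :
    ¬ cs.getD (skipSp cs limit idx) ' ' = ' ' := by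
  fun_induction skipSp cs limit idx with
  | case1 idx hh ih => exact ih h
  | case2 idx hh => intro hc; exact hh ⟨h, hc⟩

theorem ofList_ne_empty (m : List Char) (hm : m ≠ []) : String.ofList m ≠ "" := by
  intro hcon
  have h0 := congrArg String.toList hcon
  simp at h0
  exact hm h0

theorem loopA_eq (cs : List Char) (idx : Nat) (words : List String) :
    loopA cs cs.length idx words = words ++ (goB (cs.drop idx)).map String.ofList := by
  fun_induction loopA cs cs.length idx words with
  | case4 idx words h =>
      rw [List.drop_eq_nil_of_le (by omega), goB]; simp
  | case1 idx words h hsp hbrk =>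
      -- space branch, trailing spaces reach the end: A breaks; goB finds no word
      have hd : cs.drop idx = cs[idx] :: cs.drop (idx + 1) := List.drop_eq_getElem_cons h
      have hc : cs[idx] = ' ' := by rwa [List.getD_eq_getElem cs ' ' h] at hsp
      have htw : ((cs.drop idx).takeWhile (· == ' ')).length
          = 1 + ((cs.drop (idx + 1)).takeWhile (· == ' ')).length := by
        rw [hd]; simp [List.takeWhile_cons, hc]; omega
      have hidx1 := skipSp_eq cs (idx + 1)
      have hrest : (cs.drop idx).dropWhile (· == ' ') = [] := by
        rw [dropWhile_eq_drop_len, List.drop_drop, List.drop_eq_nil_of_le]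
        omega
      rw [goB]; simp [hrest]
  | case2 idx words h hsp hbrk ih =>
      -- space branch, a word follows: the token is the space run plus the word
      simp only [dite_eq_ite] at ih
      rw [ih]
      have hidx1 := skipSp_eq cs (idx + 1)
      set idx1 := skipSp cs cs.length (idx + 1) with hidx1def
      have hd : cs.drop idx = cs[idx] :: cs.drop (idx + 1) := List.drop_eq_getElem_cons h
      have hc : cs[idx] = ' ' := by rwa [List.getD_eq_getElem cs ' ' h] at hsp
      have hsplen : ((cs.drop idx).takeWhile (· == ' ')).length = idx1 - idx := by
        rw [hd]; simp [List.takeWhile_cons, hc]; omega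
      have hrest : (cs.drop idx).dropWhile (· == ' ') = cs.drop idx1 := by
        rw [dropWhile_eq_drop_len, List.drop_drop, hsplen]
        congr 1; omega
      have hidx2 := skipNon_eq cs idx1
      set idx2 := skipNon cs cs.length idx1 with hidx2def
      have hidx1lt : idx1 < cs.length := by omega
      have hstop : ¬ cs.getD idx1 ' ' = ' ' := skipSp_stop cs cs.length (idx + 1) (by omega)
      have hw : (cs.drop idx1).takeWhile (fun c => !(c == ' ')) ≠ [] := by
        cases hd1 : cs.drop idx1 with
        | nil => rw [List.drop_eq_nil_iff] at hd1; omega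
        | cons c t =>
            have hc0 : cs[idx1]? = some c := by
              have hq : (cs.drop idx1)[0]? = cs[idx1 + 0]? := List.getElem?_drop
              rw [hd1] at hq; simpa using hq.symm
            have hc1 : (c == ' ') = false := by
              rw [List.getD_eq_getElem?_getD, hc0] at hstop
              simpa using hstop
            rw [List.takeWhile_cons]; simp [hc1]
      have htoken : (cs.drop idx).take (idx2 - idx)
          = (cs.drop idx).takeWhile (· == ' ')
            ++ (cs.drop idx1).takeWhile (fun c => !(c == ' ')) := by
        conv_lhs => rw [← List.takeWhile_append_dropWhile (p := (· == ' ')) (l := cs.drop idx)]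
        rw [List.take_append, hsplen, hrest]
        have h2 : idx2 - idx - (idx1 - idx) = idx2 - idx1 := by omega
        rw [h2, hidx2, Nat.add_sub_cancel_left, ← takeWhile_eq_take_len]
        congr 1
        apply List.take_of_length_le
        rw [hsplen]
        omega
      have hw2 : (cs.drop idx1).dropWhile (fun c => !(c == ' ')) = cs.drop idx2 := by
        rw [dropWhile_eq_drop_len, List.drop_drop, hidx2, Nat.add_comm]
      have hne : String.ofList ((cs.drop idx).take (idx2 - idx)) ≠ "" := by
        rw [htoken]
        exact ofList_ne_empty _ (by simp [hw])
      rw [if_neg hne]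
      conv_rhs => rw [goB]
      simp only [hrest, dif_neg hw, List.map_cons]
      rw [htoken, hw2]
      simp
  | case3 idx words h hsp ih =>
      -- non-space branch: the token is the bare word, no leading spaces
      simp only [dite_eq_ite] at ih
      rw [ih]
      have hd : cs.drop idx = cs[idx] :: cs.drop (idx + 1) := List.drop_eq_getElem_cons h
      have hc : (cs[idx] == ' ') = false := by
        rw [List.getD_eq_getElem cs ' ' h] at hsp; simpa using hsp
      have hidx2 := skipNon_eq cs idx
      set idx2 := skipNon cs cs.length idx with hidx2def
      have hsp0 : (cs.drop idx).takeWhile (· == ' ') = [] := by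
        rw [hd, List.takeWhile_cons]; simp [hc]
      have hrest : (cs.drop idx).dropWhile (· == ' ') = cs.drop idx := by
        rw [dropWhile_eq_drop_len, hsp0]; simp
      have hw : (cs.drop idx).takeWhile (fun c => !(c == ' ')) ≠ [] := by
        rw [hd, List.takeWhile_cons]; simp [hc]
      have htoken : (cs.drop idx).take (idx2 - idx)
          = (cs.drop idx).takeWhile (fun c => !(c == ' ')) := by
        rw [hidx2, Nat.add_sub_cancel_left, ← takeWhile_eq_take_len]
      have hw2 : (cs.drop idx).dropWhile (fun c => !(c == ' ')) = cs.drop idx2 := by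
        rw [dropWhile_eq_drop_len, List.drop_drop, hidx2, Nat.add_comm]
      have hne : String.ofList ((cs.drop idx).take (idx2 - idx)) ≠ "" := by
        rw [htoken]
        exact ofList_ne_empty _ hw
      rw [if_neg hne]
      conv_rhs => rw [goB]
      simp only [hrest, dif_neg hw, List.map_cons]
      rw [htoken, hw2, hsp0]
      simp

-- ===== VERDICT (by name: the statement is the Claim_ definition above) =====
theorem space_prefixed_words_py_spec : Claim_equal_space_prefixed_words_py := by
  intro text _
  unfold Spec_space_prefixed_words_py space_prefixed_words_py space_prefixed_words_py_alt
  simpa using loopA_eq text.toList 0 []
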